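-- pv_equiv track=rewrite | github.com/drumstick-zjt/cs61a | hw/hw03/parsons_probs/neighbor_digits.py | neighbor_digits
-- ===== SOURCE A (Python) =====
-- def neighbor_digits(num, prev_digit=-1):
--     """
--     Returns the number of digits in num that have the same digit to its right
--     or left.
--     >>> neighbor_digits(111)
--     3
--     >>> neighbor_digits(123)
--     0
--     >>> neighbor_digits(112)
--     2
--     >>> neighbor_digits(1122)
--     4
--     """
--     if num == 0:
--         return 0
--     cur_digit = num % 10
--     next_digit = (num // 10) % 10
--     if cur_digit == prev_digit or cur_digit == next_digit:
--         return 1 + neighbor_digits(num // 10, cur_digit)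
--     else:
--         return neighbor_digits(num // 10, cur_digit)
-- ===== SOURCE B (Python) =====
-- def neighbor_digits(num, prev_digit=-1):
--     # Stage 1: collect digits, least-significant first.
--     digits = []
--     while num != 0:
--         digits.append(num % 10)
--         num //= 10
--     # Stage 2: one zip-based adjacency scan (left = digit below, right = digit above, 0-padded).
--     lefts = [prev_digit] + digits[:-1]
--     rights = digits[1:] + [0]
--     return sum(1 for d, l, r in zip(digits, lefts, rights) if d == l or d == r)
-- ===== Notes on version B (the rewrite author's own statement) =====
-- stated objective: alternative
-- what changed: Replaces A's non-tail recursion with two staged passes: first collect the digit list, then count matches in a single zip scan against the left- and right-shifted lists.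
import Mathlib
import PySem

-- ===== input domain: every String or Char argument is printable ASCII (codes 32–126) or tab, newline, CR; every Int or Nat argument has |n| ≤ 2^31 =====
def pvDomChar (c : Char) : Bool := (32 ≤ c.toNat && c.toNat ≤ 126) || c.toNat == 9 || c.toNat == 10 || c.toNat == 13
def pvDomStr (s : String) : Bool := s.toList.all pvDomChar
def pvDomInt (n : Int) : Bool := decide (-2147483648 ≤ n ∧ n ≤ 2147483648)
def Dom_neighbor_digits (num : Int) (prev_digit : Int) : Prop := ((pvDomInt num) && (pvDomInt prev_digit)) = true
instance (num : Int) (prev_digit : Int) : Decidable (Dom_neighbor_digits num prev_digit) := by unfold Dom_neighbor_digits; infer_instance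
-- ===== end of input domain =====

-- B replaces A's recursion with two staged passes (collect digits, then a zip adjacency scan); equivalence proved on num ≥ 0 (A recurses forever on negatives).


-- ===== PORT A =====
-- A's recursion, on the number's Nat value (Pre_ restricts to num ≥ 0, where Python's
-- % and // coincide with Nat mod and div; for nonneg n, num % 10 = n % 10 exactly).
def neighborDigitsRecA (n : Nat) (prev_digit : Int) : Int :=
  if h : n = 0 then 0
  else
    let cur_digit : Int := (n % 10 : Nat)
    let next_digit : Int := ((n / 10) % 10 : Nat)
    if cur_digit = prev_digit ∨ cur_digit = next_digit then
      1 + neighborDigitsRecA (n / 10) cur_digit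
    else
      neighborDigitsRecA (n / 10) cur_digit
termination_by n
decreasing_by all_goals exact Nat.div_lt_self (Nat.pos_of_ne_zero h) (by norm_num)

def neighbor_digits (num : Int) (prev_digit : Int) : Int :=
  neighborDigitsRecA num.toNat prev_digit

-- ===== PORT B =====
-- Stage 1 of Source B: the while loop appending num % 10 and dividing by 10.
def collectDigitsB (n : Nat) (acc : List Int) : List Int :=
  if h : n = 0 then acc
  else collectDigitsB (n / 10) (acc ++ [((n % 10 : Nat) : Int)])
termination_by n
decreasing_by all_goals exact Nat.div_lt_self (Nat.pos_of_ne_zero h) (by norm_num)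

-- Stage 2 of Source B: shift-zip scan counting positions whose digit matches a neighbour.
def neighbor_digits_alt (num : Int) (prev_digit : Int) : Int :=
  let digits := collectDigitsB num.toNat []
  let lefts := prev_digit :: digits.dropLast
  let rights := digits.tail ++ [0]
  ((digits.zip (lefts.zip rights)).countP (fun t => t.1 == t.2.1 || t.1 == t.2.2) : Nat)

-- ===== PRECONDITION & SPEC =====
-- Pre_ excludes negative num, on which Python A recurses without terminating (RecursionError).
def Pre_neighbor_digits (num : Int) (prev_digit : Int) : Prop := 0 ≤ num
instance (num : Int) (prev_digit : Int) : Decidable (Pre_neighbor_digits num prev_digit) := by unfold Pre_neighbor_digits; infer_instance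
def pvWitness_neighbor_digits : Int × Int := (1122, -1)

def Spec_neighbor_digits (num : Int) (prev_digit : Int) (out : Int) : Prop := out = neighbor_digits_alt num prev_digit
instance (num : Int) (prev_digit : Int) (out : Int) : Decidable (Spec_neighbor_digits num prev_digit out) := by unfold Spec_neighbor_digits; infer_instance

-- ===== CLAIM (what is proved, stated in full; the proofs are below) =====
def Claim_equal_neighbor_digits : Prop := ∀ (num : Int) (prev_digit : Int), Dom_neighbor_digits num prev_digit → Pre_neighbor_digits num prev_digit → Spec_neighbor_digits num prev_digit (neighbor_digits num prev_digit)

-- ===== LEMMAS AND PROOFS =====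
-- Proof-side digit list (no accumulator), and the right-fold form of the scan.
def simpleDigits (n : Nat) : List Int :=
  if h : n = 0 then []
  else ((n % 10 : Nat) : Int) :: simpleDigits (n / 10)
termination_by n
decreasing_by all_goals exact Nat.div_lt_self (Nat.pos_of_ne_zero h) (by norm_num)

def scanCnt : List Int → Int → Int
  | [], _ => 0
  | d :: ds, prev => (if d = prev ∨ d = ds.headD 0 then 1 else 0) + scanCnt ds d

theorem collectDigitsB_eq (n : Nat) (acc : List Int) :
    collectDigitsB n acc = acc ++ simpleDigits n := by
  induction n using Nat.strong_induction_on generalizing acc with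
  | _ n ih =>
    by_cases h : n = 0
    · subst h; simp [collectDigitsB, simpleDigits]
    · rw [collectDigitsB, simpleDigits]
      simp only [h, dite_false]
      rw [ih _ (Nat.div_lt_self (Nat.pos_of_ne_zero h) (by norm_num))]
      simp

theorem zipCnt_eq_scanCnt (ds : List Int) (prev : Int) :
    ((ds.zip ((prev :: ds.dropLast).zip (ds.tail ++ [0]))).countP
        (fun t => t.1 == t.2.1 || t.1 == t.2.2) : Int) = scanCnt ds prev := by
  induction ds generalizing prev with
  | nil => simp [scanCnt]
  | cons d rest ih =>
    cases rest with
    | nil =>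
      by_cases h1 : d = prev <;> by_cases h2 : d = 0 <;>
        simp [scanCnt, List.countP_cons, h1, h2, beq_iff_eq]
    | cons r rs =>
      have step :
          ((d :: r :: rs).zip (((prev :: (d :: r :: rs).dropLast)).zip ((d :: r :: rs).tail ++ [0])))
            = (d, (prev, r)) :: ((r :: rs).zip ((d :: (r :: rs).dropLast).zip ((r :: rs).tail ++ [0]))) := by
        simp [List.zip]
      rw [step, List.countP_cons]
      have := ih d
      push_cast [scanCnt]
      rw [this]
      by_cases h1 : d = prev <;> by_cases h2 : d = r <;>
        simp [h1, h2, beq_iff_eq, scanCnt] <;> ring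

theorem headD_simpleDigits (m : Nat) : (simpleDigits m).headD 0 = ((m % 10 : Nat) : Int) := by
  by_cases h : m = 0
  · subst h; simp [simpleDigits]
  · rw [simpleDigits]; simp [h]

theorem scanCnt_simple_eq_recA (n : Nat) (prev : Int) :
    scanCnt (simpleDigits n) prev = neighborDigitsRecA n prev := by
  induction n using Nat.strong_induction_on generalizing prev with
  | _ n ih =>
    by_cases h : n = 0
    · subst h; simp [simpleDigits, neighborDigitsRecA, scanCnt]
    · rw [simpleDigits, neighborDigitsRecA]
      simp only [h, dite_false]
      rw [scanCnt, headD_simpleDigits]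
      rw [ih _ (Nat.div_lt_self (Nat.pos_of_ne_zero h) (by norm_num))]
      split_ifs with hc
      · rfl
      · simp

-- ===== VERDICT (by name: the statement is the Claim_ definition above) =====
theorem neighbor_digits_spec : Claim_equal_neighbor_digits := by
  intro num prev_digit _ _
  unfold Spec_neighbor_digits neighbor_digits neighbor_digits_alt
  rw [collectDigitsB_eq]
  simp only [List.nil_append]
  rw [zipCnt_eq_scanCnt, scanCnt_simple_eq_recA]
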